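-- pv_equiv track=rewrite | github.com/altoidbox/advent-of-code | 2022/Day19/main.py | print_cost
-- ===== SOURCE A (Python) =====
-- def print_cost(cost):
--     msg = ''
--     for i, (t, q) in enumerate(cost.items()):
--         if i == 0:
--             prefix = ''
--         elif len(cost) - 1 != i:
--             prefix = ', '
--         else:
--             prefix = ' and '
--         msg += f'{prefix}{q} {t}'
--     return msg
-- ===== SOURCE B (Python) =====
-- def print_cost(cost):
--     parts = [f'{q} {t}' for t, q in cost.items()]
--     if not parts:
--         return ''
--     if len(parts) == 1:
--         return parts[0]
--     return ', '.join(parts[:-1]) + ' and ' + parts[-1]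
-- ===== Notes on version B (the rewrite author's own statement) =====
-- stated objective: idiomatic
-- what changed: Replaces A's single accumulating loop with per-index prefix branching by building the list of formatted pieces first and assembling the result with empty/single guards plus ', '.join of all but the last piece followed by ' and ' plus the last.
import Mathlib
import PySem

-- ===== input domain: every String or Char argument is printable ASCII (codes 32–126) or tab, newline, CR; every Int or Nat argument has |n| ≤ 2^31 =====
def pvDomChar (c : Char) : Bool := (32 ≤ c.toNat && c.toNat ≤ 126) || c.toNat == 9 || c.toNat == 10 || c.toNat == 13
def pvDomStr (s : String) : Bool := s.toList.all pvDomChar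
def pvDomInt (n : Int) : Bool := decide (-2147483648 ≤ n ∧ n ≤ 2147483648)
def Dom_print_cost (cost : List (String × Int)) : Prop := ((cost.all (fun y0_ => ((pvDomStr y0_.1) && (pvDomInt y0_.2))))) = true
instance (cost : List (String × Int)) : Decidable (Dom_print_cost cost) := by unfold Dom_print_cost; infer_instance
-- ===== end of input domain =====

-- B builds the list of formatted pieces first and joins all but the last with ", " then appends
-- " and " and the last piece, instead of A's accumulating loop with per-index prefix branching (idiomatic; no speed claim).

-- ===== PORT A =====
def print_cost (cost : List (String × Int)) : String :=
  (PySem.List.enumerate cost).foldl (fun msg itq =>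
    let pfx : String :=
      if itq.1 = 0 then ""
      else if (cost.length : Int) - 1 ≠ itq.1 then ", "
      else " and "
    msg ++ pfx ++ PySem.Int.toStr itq.2.2 ++ " " ++ itq.2.1) ""

-- ===== PORT B =====
def print_cost_alt (cost : List (String × Int)) : String :=
  let parts := cost.map (fun tq => PySem.Int.toStr tq.2 ++ " " ++ tq.1)
  if parts = [] then ""
  else if parts.length = 1 then ((PySem.List.pyGet? parts 0).getD "")
  else PySem.Str.join ", " (PySem.List.slice parts none (some (-1))) ++ " and "
         ++ ((PySem.List.pyGet? parts (-1)).getD "")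

-- ===== PRECONDITION & SPEC =====
def Spec_print_cost (cost : List (String × Int)) (out : String) : Prop := out = print_cost_alt cost
instance (cost : List (String × Int)) (out : String) : Decidable (Spec_print_cost cost out) := by unfold Spec_print_cost; infer_instance

-- ===== CLAIM (what is proved, stated in full; the proofs are below) =====
def Claim_equal_print_cost : Prop := ∀ (cost : List (String × Int)), Dom_print_cost cost → Spec_print_cost cost (print_cost cost)

-- ===== LEMMAS AND PROOFS =====

-- one formatted piece, on the char-list side
def pvPiece (tq : String × Int) : List Char :=
  PySem.Int.toChars tq.2 ++ ' ' :: tq.1.toList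

-- A's contribution of the entries after the first one (each gets ", " except the last, which gets " and ")
def pvTail (ys : List (String × Int)) : List Char :=
  match ys with
  | [] => []
  | [x] => " and ".toList ++ pvPiece x
  | x :: xs => ", ".toList ++ pvPiece x ++ pvTail xs

lemma pvTail_cons_cons (x y : String × Int) (ys : List (String × Int)) :
    pvTail (x :: y :: ys) = ", ".toList ++ pvPiece x ++ pvTail (y :: ys) := rfl

lemma print_cost_fold (n : Nat) (ys : List (String × Int)) (k : Nat) (msg : String)
    (hk : 1 ≤ k) (hn : k + ys.length = n) :
    ((PySem.List.enumerate ys (k : Int)).foldl (fun msg itq =>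
      let pfx : String :=
        if itq.1 = 0 then ""
        else if (n : Int) - 1 ≠ itq.1 then ", "
        else " and "
      msg ++ pfx ++ PySem.Int.toStr itq.2.2 ++ " " ++ itq.2.1) msg).toList
      = msg.toList ++ pvTail ys := by
  induction ys generalizing k msg with
  | nil => simp [PySem.List.enumerate_nil, pvTail]
  | cons x xs ih =>
    rw [PySem.List.enumerate_cons, List.foldl_cons]
    have hk0 : ¬ ((k : Int) = 0) := by omega
    have hkn : ¬ (k = 0) := by omega
    cases xs with
    | nil =>
      simp only [List.length_cons, List.length_nil] at hn
      have hlast : ((n : Int) - 1) = (k : Int) := by omega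
      simp [PySem.List.enumerate_nil, hkn, hlast, pvTail, pvPiece,
        String.toList_append, PySem.Int.toList_toStr]
    | cons y yy =>
      simp only [List.length_cons] at hn
      have hmid : ¬ (((n : Int) - 1) = (k : Int)) := by omega
      have hstep : ((k : Int) + 1) = ((k + 1 : Nat) : Int) := by push_cast; ring
      rw [hstep, ih (k + 1) _ (by omega) (by simp only [List.length_cons]; omega)]
      rw [pvTail_cons_cons]
      simp [hkn, hmid, pvPiece, String.toList_append, PySem.Int.toList_toStr]

lemma pvJoin_tail (p : String × Int) (ps : List (String × Int)) (hps : ps ≠ []) :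
    pvPiece p ++ pvTail ps
      = (PySem.Str.join ", " ((p :: ps).map (fun tq => PySem.Int.toStr tq.2 ++ " " ++ tq.1)
          |>.dropLast)).toList
        ++ " and ".toList
        ++ pvPiece (ps.getLast hps) := by
  induction ps generalizing p with
  | nil => exact absurd rfl hps
  | cons q qs ih =>
    cases qs with
    | nil =>
      simp [pvTail, PySem.Str.toList_join, PySem.Chars.join_singleton, pvPiece,
        String.toList_append, PySem.Int.toList_toStr]
    | cons r rs =>
      rw [pvTail_cons_cons, show pvPiece p ++ (", ".toList ++ pvPiece q ++ pvTail (r :: rs))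
          = pvPiece p ++ ", ".toList ++ (pvPiece q ++ pvTail (r :: rs)) by simp,
        ih q (by simp)]
      have hgl : (q :: r :: rs).getLast (by simp) = (r :: rs).getLast (by simp) :=
        List.getLast_cons (by simp)
      rw [hgl]
      have hmapq : ((q :: r :: rs).map (fun tq => PySem.Int.toStr tq.2 ++ " " ++ tq.1)) =
          (PySem.Int.toStr q.2 ++ " " ++ q.1) :: ((r :: rs).map (fun tq => PySem.Int.toStr tq.2 ++ " " ++ tq.1)) := rfl
      have hdl : ((p :: q :: r :: rs).map (fun tq => PySem.Int.toStr tq.2 ++ " " ++ tq.1)).dropLast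
          = (PySem.Int.toStr p.2 ++ " " ++ p.1) ::
            ((q :: r :: rs).map (fun tq => PySem.Int.toStr tq.2 ++ " " ++ tq.1)).dropLast := by
        simp [List.dropLast_cons_of_ne_nil]
      rw [hdl, hmapq]
      simp [PySem.Str.toList_join, PySem.Chars.join_cons_cons, pvPiece,
        String.toList_append, PySem.Int.toList_toStr]

lemma print_cost_eq (cost : List (String × Int)) : print_cost cost = print_cost_alt cost := by
  cases cost with
  | nil => rfl
  | cons x xs =>
    cases xs with
    | nil =>
      apply String.toList_inj.mp
      simp [print_cost, print_cost_alt, PySem.List.enumerate_cons, PySem.List.enumerate_nil,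
        PySem.List.pyGet?, PySem.List.pyIdx?, String.toList_append, PySem.Int.toList_toStr]
    | cons y rest =>
      apply String.toList_inj.mp
      unfold print_cost print_cost_alt
      rw [PySem.List.enumerate_cons, List.foldl_cons]
      have hA := print_cost_fold (x :: y :: rest).length (y :: rest) 1
        ("" ++ (if (0:Int) = 0 then "" else if ((x :: y :: rest).length : Int) - 1 ≠ (0:Int) then ", " else " and ")
          ++ PySem.Int.toStr x.2 ++ " " ++ x.1) (le_refl 1) (by simp only [List.length_cons]; omega)
      rw [show ((0:Int) + 1) = ((1:Nat) : Int) by norm_num] at *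
      rw [hA]
      have hmapne : ((y :: rest).map (fun tq => PySem.Int.toStr tq.2 ++ " " ++ tq.1)) ≠ [] := by simp
      have hsplit : (x :: y :: rest).map (fun tq => PySem.Int.toStr tq.2 ++ " " ++ tq.1)
          = ((x :: y :: rest).map (fun tq => PySem.Int.toStr tq.2 ++ " " ++ tq.1)).dropLast
            ++ [((x :: y :: rest).map (fun tq => PySem.Int.toStr tq.2 ++ " " ++ tq.1)).getLast (by simp)] :=
        (List.dropLast_append_getLast (by simp)).symm
      have hJ := pvJoin_tail x (y :: rest) (by simp)
      have hget : (PySem.List.pyGet? ((x :: y :: rest).map (fun tq => PySem.Int.toStr tq.2 ++ " " ++ tq.1)) (-1)).getD ""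
          = ((x :: y :: rest).map (fun tq => PySem.Int.toStr tq.2 ++ " " ++ tq.1)).getLast (by simp) := by
        conv_lhs => rw [hsplit]
        rw [PySem.List.pyGet?_neg_one_append_singleton]
        rfl
      rw [if_neg (show ¬ (x :: y :: rest).map (fun tq => PySem.Int.toStr tq.2 ++ " " ++ tq.1) = [] by simp),
        if_neg (show ¬ ((x :: y :: rest).map (fun tq => PySem.Int.toStr tq.2 ++ " " ++ tq.1)).length = 1 by
          simp only [List.length_map, List.length_cons]; omega), PySem.List.slice_to_neg_one, hget,
        List.getLast_map (by simp), List.getLast_cons (by simp)]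
      simpa [pvPiece, PySem.Str.toList_join, String.toList_append,
        PySem.Int.toList_toStr, List.map_dropLast] using hJ

theorem print_cost_spec : Claim_equal_print_cost := by
  intro cost _
  unfold Spec_print_cost
  exact print_cost_eq cost
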